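-- pv_equiv track=rewrite | github.com/Hyjkblj/BlazePen | backend/training/cli_story_script.py | _resolve_primary_risk_type
-- ===== SOURCE A (Python) =====
-- from typing import Any, Dict, List
--
-- def _resolve_primary_risk_type(risk_flags: List[str]) -> str:
--     """根据风险标签归类编辑部反馈类型。"""
--     normalized_flags = [str(item or "").strip().lower() for item in risk_flags if str(item or "").strip()]
--     if any(flag in {"source_exposure_risk", "privacy_leak_risk"} for flag in normalized_flags):
--         return "source_safety"
--     if any(flag in {"high_risk_unverified_publish", "rumor_spread_risk"} for flag in normalized_flags):
--         return "verification"
--     if any("panic" in flag for flag in normalized_flags):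
--         return "public_panic"
--     return "generic"
-- ===== SOURCE B (Python) =====
-- def _resolve_primary_risk_type(risk_flags):
--     """Single pass with three booleans instead of building a list and scanning it three times."""
--     has_source = has_verify = has_panic = False
--     for item in risk_flags:
--         flag = str(item or "").strip().lower()
--         if not flag:
--             continue
--         if flag in ("source_exposure_risk", "privacy_leak_risk"):
--             has_source = True
--         elif flag in ("high_risk_unverified_publish", "rumor_spread_risk"):
--             has_verify = True
--         elif "panic" in flag:
--             has_panic = True
--     if has_source:
--         return "source_safety"
--     if has_verify:
--         return "verification"
--     if has_panic:
--         return "public_panic"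
--     return "generic"
-- ===== Notes on version B (the rewrite author's own statement) =====
-- stated objective: alternative
-- what changed: B makes one pass over the flags maintaining three booleans and decides by priority at the end, instead of materialising a normalized list and scanning it with three separate any() passes.
import Mathlib
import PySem

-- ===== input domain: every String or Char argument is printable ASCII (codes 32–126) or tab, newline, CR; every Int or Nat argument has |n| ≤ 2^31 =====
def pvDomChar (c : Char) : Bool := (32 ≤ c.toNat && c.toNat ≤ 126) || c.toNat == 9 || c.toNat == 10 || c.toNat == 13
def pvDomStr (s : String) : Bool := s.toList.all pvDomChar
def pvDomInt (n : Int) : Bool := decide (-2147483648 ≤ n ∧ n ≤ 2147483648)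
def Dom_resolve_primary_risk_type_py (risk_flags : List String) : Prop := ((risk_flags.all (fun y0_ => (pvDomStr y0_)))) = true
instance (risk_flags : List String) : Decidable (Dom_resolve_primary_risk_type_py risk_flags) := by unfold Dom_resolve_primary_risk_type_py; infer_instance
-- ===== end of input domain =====

-- B changes the decomposition only (one pass with three booleans instead of a normalized list plus three any() scans); same results on all inputs.

-- shared normalization: str(item or "").strip()  (Python `item or ""` on a str is the string itself, or "" when empty)
def pvStripped (item : String) : String := PySem.Str.strip (if item == "" then "" else item)

-- ===== PORT A =====
-- loop body of A's list comprehension: append the lowered flag when the stripped string is truthy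
def pvStepA (acc : List String) (item : String) : List String :=
  let s := pvStripped item
  if s == "" then acc else acc ++ [PySem.Str.lower s]

def resolve_primary_risk_type_py (risk_flags : List String) : String :=
  let normalized_flags : List String := risk_flags.foldl pvStepA []
  if normalized_flags.any (fun flag => flag == "source_exposure_risk" || flag == "privacy_leak_risk") then
    "source_safety"
  else if normalized_flags.any (fun flag => flag == "high_risk_unverified_publish" || flag == "rumor_spread_risk") then
    "verification"
  else if normalized_flags.any (fun flag => PySem.Str.isIn "panic" flag) then
    "public_panic"
  else
    "generic"

-- ===== PORT B =====
-- loop body of B's single pass: state = (has_source, has_verify, has_panic)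
def pvStepB (st : Bool × Bool × Bool) (item : String) : Bool × Bool × Bool :=
  let flag := PySem.Str.lower (pvStripped item)
  if flag == "" then st
  else if flag == "source_exposure_risk" || flag == "privacy_leak_risk" then (true, st.2.1, st.2.2)
  else if flag == "high_risk_unverified_publish" || flag == "rumor_spread_risk" then (st.1, true, st.2.2)
  else if PySem.Str.isIn "panic" flag then (st.1, st.2.1, true)
  else st

def resolve_primary_risk_type_py_alt (risk_flags : List String) : String :=
  let st : Bool × Bool × Bool := risk_flags.foldl pvStepB (false, false, false)
  if st.1 then "source_safety"
  else if st.2.1 then "verification"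
  else if st.2.2 then "public_panic"
  else "generic"

-- ===== PRECONDITION & SPEC =====
def Spec_resolve_primary_risk_type_py (risk_flags : List String) (out : String) : Prop := out = resolve_primary_risk_type_py_alt risk_flags
instance (risk_flags : List String) (out : String) : Decidable (Spec_resolve_primary_risk_type_py risk_flags out) := by unfold Spec_resolve_primary_risk_type_py; infer_instance

-- ===== CLAIM (what is proved, stated in full; the proofs are below) =====
def Claim_equal_resolve_primary_risk_type_py : Prop := ∀ (risk_flags : List String), Dom_resolve_primary_risk_type_py risk_flags → Spec_resolve_primary_risk_type_py risk_flags (resolve_primary_risk_type_py risk_flags)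

-- ===== LEMMAS AND PROOFS =====

-- per-item tests on the original items (flag nonempty and in the respective category)
def pvQ1 (item : String) : Bool :=
  let f := PySem.Str.lower (pvStripped item)
  !(f == "") && (f == "source_exposure_risk" || f == "privacy_leak_risk")
def pvQ2 (item : String) : Bool :=
  let f := PySem.Str.lower (pvStripped item)
  !(f == "") && (f == "high_risk_unverified_publish" || f == "rumor_spread_risk")
def pvQ3 (item : String) : Bool :=
  let f := PySem.Str.lower (pvStripped item)
  !(f == "") && PySem.Str.isIn "panic" f

-- lower "" = "" and lower preserves length, so the emptiness test commutes with lower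
lemma pvLower_empty_iff (s : String) : (PySem.Str.lower s == "") = (s == "") := by
  rw [Bool.eq_iff_iff]
  simp only [beq_iff_eq, ← String.toList_inj, PySem.Str.toList_lower, PySem.Chars.lower]
  simp

-- any is determined by the values of the predicate on members
lemma pvAny_congr_mem {α : Type} (l : List α) (p q : α → Bool) (h : ∀ x ∈ l, p x = q x) :
    l.any p = l.any q := by
  induction l with
  | nil => rfl
  | cons x xs ih =>
    simp only [List.any_cons, h x (by simp), ih (fun y hy => h y (by simp [hy]))]

-- B's step, expressed componentwise
lemma pvStepB_eq (st : Bool × Bool × Bool) (x : String) :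
    pvStepB st x = (st.1 || pvQ1 x, st.2.1 || (!(pvQ1 x) && pvQ2 x),
                    st.2.2 || (!(pvQ1 x) && !(pvQ2 x) && pvQ3 x)) := by
  simp only [pvStepB, pvQ1, pvQ2, pvQ3]
  by_cases b0 : (PySem.Str.lower (pvStripped x) == "") <;>
    by_cases b1 : (PySem.Str.lower (pvStripped x) == "source_exposure_risk" ||
      PySem.Str.lower (pvStripped x) == "privacy_leak_risk") <;>
    by_cases b2 : (PySem.Str.lower (pvStripped x) == "high_risk_unverified_publish" ||
      PySem.Str.lower (pvStripped x) == "rumor_spread_risk") <;>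
    by_cases b3 : PySem.Chars.isIn ['p','a','n','i','c'] (PySem.Chars.lower (pvStripped x).toList) <;>
    simp [b0, b1, b2, b3]

-- A's built list, scanned with any test q, is a single any over the items
lemma normA_any (q : String → Bool) (l : List String) (acc : List String) :
    ((l.foldl pvStepA acc).any q)
      = (acc.any q || l.any (fun item => !(pvStripped item == "") && q (PySem.Str.lower (pvStripped item)))) := by
  induction l generalizing acc with
  | nil => simp
  | cons x xs ih =>
    rw [List.foldl_cons, ih, List.any_cons]
    simp only [pvStepA]
    by_cases h : pvStripped x == ""
    · simp [h]
    · simp [h, Bool.or_assoc]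

-- B's fold computes the three anys componentwise
lemma foldB (l : List String) (a b c : Bool) :
    l.foldl pvStepB (a, b, c)
      = (a || l.any pvQ1,
         b || l.any (fun i => !(pvQ1 i) && pvQ2 i),
         c || l.any (fun i => !(pvQ1 i) && !(pvQ2 i) && pvQ3 i)) := by
  induction l generalizing a b c with
  | nil => simp
  | cons x xs ih =>
    rw [List.foldl_cons, pvStepB_eq, ih]
    simp [Bool.or_assoc]

-- ===== VERDICT (by name: the statement is the Claim_ definition above) =====
theorem resolve_primary_risk_type_py_spec : Claim_equal_resolve_primary_risk_type_py := by
  intro l _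
  show resolve_primary_risk_type_py l = resolve_primary_risk_type_py_alt l
  unfold resolve_primary_risk_type_py resolve_primary_risk_type_py_alt
  simp only [normA_any, foldB, List.any_nil, Bool.false_or]
  rw [pvAny_congr_mem l (fun item => !(pvStripped item == "") &&
        (PySem.Str.lower (pvStripped item) == "source_exposure_risk" ||
         PySem.Str.lower (pvStripped item) == "privacy_leak_risk")) pvQ1
        (fun x _ => by simp [pvQ1, pvLower_empty_iff]),
      pvAny_congr_mem l (fun item => !(pvStripped item == "") &&
        (PySem.Str.lower (pvStripped item) == "high_risk_unverified_publish" ||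
         PySem.Str.lower (pvStripped item) == "rumor_spread_risk")) pvQ2
        (fun x _ => by simp [pvQ2, pvLower_empty_iff]),
      pvAny_congr_mem l (fun item => !(pvStripped item == "") &&
        PySem.Str.isIn "panic" (PySem.Str.lower (pvStripped item))) pvQ3
        (fun x _ => by simp [pvQ3, pvLower_empty_iff])]
  by_cases h1 : l.any pvQ1
  · simp [h1]
  · have h1' : ∀ x ∈ l, pvQ1 x = false := by
      intro x hx
      exact Bool.eq_false_iff.mpr fun hc => h1 (List.any_eq_true.mpr ⟨x, hx, hc⟩)
    rw [pvAny_congr_mem l (fun i => !(pvQ1 i) && pvQ2 i) pvQ2 (fun x hx => by simp [h1' x hx])]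
    by_cases h2 : l.any pvQ2
    · simp [h1, h2]
    · have h2' : ∀ x ∈ l, pvQ2 x = false := by
        intro x hx
        exact Bool.eq_false_iff.mpr fun hc => h2 (List.any_eq_true.mpr ⟨x, hx, hc⟩)
      rw [pvAny_congr_mem l (fun i => !(pvQ1 i) && !(pvQ2 i) && pvQ3 i) pvQ3
            (fun x hx => by simp [h1' x hx, h2' x hx])]
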